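-- pv_equiv track=rewrite | github.com/fmotamedeiros/lnpg | compiladores/python/3. Linguagem Imperativa I/parser.py | consumirTokens
-- ===== SOURCE A (Python) =====
-- construcoes = [
--     (['VAR', 'IGUAL', 'VAR', 'SEPARADOR'], 'AtrSimples'),
--     (['VAR', 'IGUAL', 'DIGITO', 'SEPARADOR'], 'AtrSimples'),
--     (['VAR', 'IGUAL', 'VAR', 'OPERADOR', 'VAR', 'SEPARADOR'], 'Atr'),
--     (['VAR', 'IGUAL', 'DIGITO', 'OPERADOR', 'DIGITO', 'SEPARADOR'], 'Atr'),
--     (['VAR', 'IGUAL', 'VAR', 'OPERADOR', 'DIGITO', 'SEPARADOR'], 'Atr'),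
--     (['VAR', 'IGUAL', 'DIGITO', 'OPERADOR', 'VAR', 'SEPARADOR'], 'Atr'),
--     (['IMPRIMIR', 'ABRIR', 'VAR', 'FECHAR', 'SEPARADOR'], 'Imprimir'),
--     (['VAR', 'ABRIR', 'FECHAR', 'SEPARADOR'], 'Funcao'),
-- ]
--
-- def consumirTokens(tokens, pos):
--     indice = pos
--     for construcao in construcoes:
--         for token in construcao[0]:
--             if token != tokens[indice][1]:
--                 indice = pos
--                 break
--             else:
--                 indice = indice + 1
--         if indice != pos:
--             return (indice, construcao[1])
--     return (pos, None)
-- ===== SOURCE B (Python) =====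
-- construcoes = [
--     (['VAR', 'IGUAL', 'VAR', 'SEPARADOR'], 'AtrSimples'),
--     (['VAR', 'IGUAL', 'DIGITO', 'SEPARADOR'], 'AtrSimples'),
--     (['VAR', 'IGUAL', 'VAR', 'OPERADOR', 'VAR', 'SEPARADOR'], 'Atr'),
--     (['VAR', 'IGUAL', 'DIGITO', 'OPERADOR', 'DIGITO', 'SEPARADOR'], 'Atr'),
--     (['VAR', 'IGUAL', 'VAR', 'OPERADOR', 'DIGITO', 'SEPARADOR'], 'Atr'),
--     (['VAR', 'IGUAL', 'DIGITO', 'OPERADOR', 'VAR', 'SEPARADOR'], 'Atr'),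
--     (['IMPRIMIR', 'ABRIR', 'VAR', 'FECHAR', 'SEPARADOR'], 'Imprimir'),
--     (['VAR', 'ABRIR', 'FECHAR', 'SEPARADOR'], 'Funcao'),
-- ]
--
-- def consumirTokens(tokens, pos):
--     # Parallel match: keep the set of still-viable patterns and read each
--     # token position at most once, instead of rescanning per pattern.
--     viaveis = construcoes
--     indice = pos
--     k = 0
--     while True:
--         for pat, nome in viaveis:
--             if len(pat) == k:
--                 return (indice, nome)
--         if not viaveis:
--             return (pos, None)
--         tok = tokens[indice][1]
--         viaveis = [(pat, nome) for pat, nome in viaveis if pat[k] == tok]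
--         indice += 1
--         k += 1
-- ===== Notes on version B (the rewrite author's own statement) =====
-- stated objective: alternative
-- what changed: Replaces the per-pattern rescan (for each of the 8 grammar patterns, re-compare tokens from pos) by a single left-to-right scan that reads each token position at most once while filtering the set of still-viable patterns, returning when a viable pattern completes or the set empties.
import Mathlib
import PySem

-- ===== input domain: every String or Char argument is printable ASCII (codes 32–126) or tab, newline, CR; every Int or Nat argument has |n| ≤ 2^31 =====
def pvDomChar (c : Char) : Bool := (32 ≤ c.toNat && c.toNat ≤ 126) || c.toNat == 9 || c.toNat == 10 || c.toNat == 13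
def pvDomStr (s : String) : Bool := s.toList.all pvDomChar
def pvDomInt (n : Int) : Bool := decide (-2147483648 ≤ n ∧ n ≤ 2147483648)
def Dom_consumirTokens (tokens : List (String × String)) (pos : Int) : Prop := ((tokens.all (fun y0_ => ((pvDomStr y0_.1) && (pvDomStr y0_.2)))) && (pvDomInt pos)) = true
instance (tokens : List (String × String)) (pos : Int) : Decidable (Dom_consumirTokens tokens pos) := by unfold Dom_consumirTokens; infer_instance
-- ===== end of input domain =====

-- ===== PORT A =====
-- B keeps the set of still-viable patterns and reads each token position at most
-- once (objective: alternative decomposition; same results, same IndexError contract).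
-- the fixed grammar table shared by both ports (module constant `construcoes`)
def pvConstrucoes : List (List String × String) :=
  [ (["VAR", "IGUAL", "VAR", "SEPARADOR"], "AtrSimples"),
    (["VAR", "IGUAL", "DIGITO", "SEPARADOR"], "AtrSimples"),
    (["VAR", "IGUAL", "VAR", "OPERADOR", "VAR", "SEPARADOR"], "Atr"),
    (["VAR", "IGUAL", "DIGITO", "OPERADOR", "DIGITO", "SEPARADOR"], "Atr"),
    (["VAR", "IGUAL", "VAR", "OPERADOR", "DIGITO", "SEPARADOR"], "Atr"),
    (["VAR", "IGUAL", "DIGITO", "OPERADOR", "VAR", "SEPARADOR"], "Atr"),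
    (["IMPRIMIR", "ABRIR", "VAR", "FECHAR", "SEPARADOR"], "Imprimir"),
    (["VAR", "ABRIR", "FECHAR", "SEPARADOR"], "Funcao") ]

-- tokens[i][1] with Python indexing; `none` = IndexError
def pvSndAt (tokens : List (String × String)) (i : Int) : Option String :=
  (PySem.List.pyGet? tokens i).map Prod.snd

-- A's inner `for token in construcao[0]` loop: on mismatch reset indice to pos and
-- break; `none` is where the Python raises IndexError (excluded by Pre_)
def pvMatchA (tokens : List (String × String)) (pos : Int) :
    List String → Int → Int
  | [], indice => indice
  | t :: rest, indice =>
    match pvSndAt tokens indice with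
    | none => pos
    | some s => if t ≠ s then pos else pvMatchA tokens pos rest (indice + 1)

-- A's outer `for construcao in construcoes` loop
def pvOuterA (tokens : List (String × String)) (pos : Int) :
    List (List String × String) → Int × Option String
  | [] => (pos, none)
  | (pat, nome) :: rest =>
    let indice := pvMatchA tokens pos pat pos
    if indice ≠ pos then (indice, some nome) else pvOuterA tokens pos rest

def consumirTokens (tokens : List (String × String)) (pos : Int) : Int × Option String :=
  pvOuterA tokens pos pvConstrucoes

-- ===== PORT B =====
-- Source B's `while True` loop; fuel 8 only makes the recursion structural: the loop
-- always returns within 8 iterations (every pattern has length ≤ 6)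
def pvLoopB (tokens : List (String × String)) (pos : Int) :
    Nat → List (List String × String) → Int → Nat → Int × Option String
  | 0, _, _, _ => (pos, none)    -- unreachable fuel guard
  | fuel + 1, viaveis, indice, k =>
    match viaveis.find? (fun pn => pn.1.length == k) with
    | some pn => (indice, some pn.2)
    | none =>
      if viaveis.isEmpty then (pos, none)
      else
        match pvSndAt tokens indice with
        | none => (pos, none)    -- IndexError in Python (excluded by Pre_)
        | some tok =>
          pvLoopB tokens pos fuel (viaveis.filter (fun pn => pn.1[k]? == some tok))
            (indice + 1) (k + 1)

def consumirTokens_alt (tokens : List (String × String)) (pos : Int) : Int × Option String :=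
  pvLoopB tokens pos 8 pvConstrucoes pos 0

-- ===== PRECONDITION & SPEC =====
-- Pre_ excludes exactly the inputs on which A raises IndexError: those where some
-- grammar pattern's prefix matches the tokens from pos and the next read runs out
-- of range (B raises the same IndexError there).
def Pre_consumirTokens (tokens : List (String × String)) (pos : Int) : Prop :=
  ∀ p ∈ pvConstrucoes, ∀ k < p.1.length,
    (∀ j < k, pvSndAt tokens (pos + (j : Int)) = p.1[j]?) →
    (PySem.List.pyGet? tokens (pos + (k : Int))).isSome

instance (tokens : List (String × String)) (pos : Int) : Decidable (Pre_consumirTokens tokens pos) := by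
  unfold Pre_consumirTokens; infer_instance

def pvWitness_consumirTokens : (List (String × String)) × Int :=
  ([("x", "VAR"), ("=", "IGUAL"), ("y", "VAR"), (";", "SEPARADOR")], 0)

def Spec_consumirTokens (tokens : List (String × String)) (pos : Int) (out : Int × Option String) : Prop := out = consumirTokens_alt tokens pos
instance (tokens : List (String × String)) (pos : Int) (out : Int × Option String) : Decidable (Spec_consumirTokens tokens pos out) := by unfold Spec_consumirTokens; infer_instance

-- ===== CLAIM (what is proved, stated in full; the proofs are below) =====
def Claim_equal_consumirTokens : Prop := ∀ (tokens : List (String × String)) (pos : Int), Dom_consumirTokens tokens pos → Pre_consumirTokens tokens pos → Spec_consumirTokens tokens pos (consumirTokens tokens pos)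

-- ===== LEMMAS AND PROOFS =====

-- The ports agree on EVERY input (on raising inputs both return the same values by
-- construction), so the claim follows without using Pre_.
theorem ports_agree (tokens : List (String × String)) (pos : Int) :
    consumirTokens tokens pos = consumirTokens_alt tokens pos := by
  unfold consumirTokens consumirTokens_alt
  cases h0 : pvSndAt tokens (pos) with
  | none => simp [pvConstrucoes, pvOuterA, pvMatchA, pvLoopB, h0]
  | some t0 =>
    by_cases hc1 : "VAR" = t0
    · subst hc1
      cases h1 : pvSndAt tokens (pos + 1) with
      | none => simp [pvConstrucoes, pvOuterA, pvMatchA, pvLoopB, h0, h1]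
      | some t1 =>
        by_cases hc2 : "IGUAL" = t1
        · subst hc2
          cases h2 : pvSndAt tokens (pos + 1 + 1) with
          | none => simp [pvConstrucoes, pvOuterA, pvMatchA, pvLoopB, h0, h1, h2]
          | some t2 =>
            by_cases hc3 : "VAR" = t2
            · subst hc3
              cases h3 : pvSndAt tokens (pos + 1 + 1 + 1) with
              | none => simp [pvConstrucoes, pvOuterA, pvMatchA, pvLoopB, h0, h1, h2, h3]
              | some t3 =>
                by_cases hc4 : "SEPARADOR" = t3
                · subst hc4
                  simp [pvConstrucoes, pvOuterA, pvMatchA, pvLoopB, h0, h1, h2, h3]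
                  omega
                · 
                  by_cases hc5 : "OPERADOR" = t3
                  · subst hc5
                    cases h4 : pvSndAt tokens (pos + 1 + 1 + 1 + 1) with
                    | none => simp [pvConstrucoes, pvOuterA, pvMatchA, pvLoopB, h0, h1, h2, h3, hc4, h4]
                    | some t4 =>
                      by_cases hc6 : "VAR" = t4
                      · subst hc6
                        cases h5 : pvSndAt tokens (pos + 1 + 1 + 1 + 1 + 1) with
                        | none => simp [pvConstrucoes, pvOuterA, pvMatchA, pvLoopB, h0, h1, h2, h3, hc4, h4, h5]
                        | some t5 =>
                          by_cases hc7 : "SEPARADOR" = t5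
                          · subst hc7
                            simp [pvConstrucoes, pvOuterA, pvMatchA, pvLoopB, h0, h1, h2, h3, hc4, h4, h5]
                            omega
                          · 
                            simp [pvConstrucoes, pvOuterA, pvMatchA, pvLoopB, h0, h1, h2, h3, hc4, h4, h5, hc7]
                      · 
                        by_cases hc8 : "DIGITO" = t4
                        · subst hc8
                          cases h5 : pvSndAt tokens (pos + 1 + 1 + 1 + 1 + 1) with
                          | none => simp [pvConstrucoes, pvOuterA, pvMatchA, pvLoopB, h0, h1, h2, h3, hc4, h4, hc6, h5]
                          | some t5 =>
                            by_cases hc9 : "SEPARADOR" = t5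
                            · subst hc9
                              simp [pvConstrucoes, pvOuterA, pvMatchA, pvLoopB, h0, h1, h2, h3, hc4, h4, hc6, h5]
                              omega
                            · 
                              simp [pvConstrucoes, pvOuterA, pvMatchA, pvLoopB, h0, h1, h2, h3, hc4, h4, hc6, h5, hc9]
                        · 
                          simp [pvConstrucoes, pvOuterA, pvMatchA, pvLoopB, h0, h1, h2, h3, hc4, h4, hc6, hc8]
                  · 
                    simp [pvConstrucoes, pvOuterA, pvMatchA, pvLoopB, h0, h1, h2, h3, hc4, hc5]
            · 
              by_cases hc10 : "DIGITO" = t2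
              · subst hc10
                cases h3 : pvSndAt tokens (pos + 1 + 1 + 1) with
                | none => simp [pvConstrucoes, pvOuterA, pvMatchA, pvLoopB, h0, h1, h2, hc3, h3]
                | some t3 =>
                  by_cases hc11 : "SEPARADOR" = t3
                  · subst hc11
                    simp [pvConstrucoes, pvOuterA, pvMatchA, pvLoopB, h0, h1, h2, hc3, h3]
                    omega
                  · 
                    by_cases hc12 : "OPERADOR" = t3
                    · subst hc12
                      cases h4 : pvSndAt tokens (pos + 1 + 1 + 1 + 1) with
                      | none => simp [pvConstrucoes, pvOuterA, pvMatchA, pvLoopB, h0, h1, h2, hc3, h3, hc11, h4]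
                      | some t4 =>
                        by_cases hc13 : "DIGITO" = t4
                        · subst hc13
                          cases h5 : pvSndAt tokens (pos + 1 + 1 + 1 + 1 + 1) with
                          | none => simp [pvConstrucoes, pvOuterA, pvMatchA, pvLoopB, h0, h1, h2, hc3, h3, hc11, h4, h5]
                          | some t5 =>
                            by_cases hc14 : "SEPARADOR" = t5
                            · subst hc14
                              simp [pvConstrucoes, pvOuterA, pvMatchA, pvLoopB, h0, h1, h2, hc3, h3, hc11, h4, h5]
                              omega
                            · 
                              simp [pvConstrucoes, pvOuterA, pvMatchA, pvLoopB, h0, h1, h2, hc3, h3, hc11, h4, h5, hc14]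
                        · 
                          by_cases hc15 : "VAR" = t4
                          · subst hc15
                            cases h5 : pvSndAt tokens (pos + 1 + 1 + 1 + 1 + 1) with
                            | none => simp [pvConstrucoes, pvOuterA, pvMatchA, pvLoopB, h0, h1, h2, hc3, h3, hc11, h4, hc13, h5]
                            | some t5 =>
                              by_cases hc16 : "SEPARADOR" = t5
                              · subst hc16
                                simp [pvConstrucoes, pvOuterA, pvMatchA, pvLoopB, h0, h1, h2, hc3, h3, hc11, h4, hc13, h5]
                                omega
                              · 
                                simp [pvConstrucoes, pvOuterA, pvMatchA, pvLoopB, h0, h1, h2, hc3, h3, hc11, h4, hc13, h5, hc16]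
                          · 
                            simp [pvConstrucoes, pvOuterA, pvMatchA, pvLoopB, h0, h1, h2, hc3, h3, hc11, h4, hc13, hc15]
                    · 
                      simp [pvConstrucoes, pvOuterA, pvMatchA, pvLoopB, h0, h1, h2, hc3, h3, hc11, hc12]
              · 
                simp [pvConstrucoes, pvOuterA, pvMatchA, pvLoopB, h0, h1, h2, hc3, hc10]
        · 
          by_cases hc17 : "ABRIR" = t1
          · subst hc17
            cases h2 : pvSndAt tokens (pos + 1 + 1) with
            | none => simp [pvConstrucoes, pvOuterA, pvMatchA, pvLoopB, h0, h1, hc2, h2]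
            | some t2 =>
              by_cases hc18 : "FECHAR" = t2
              · subst hc18
                cases h3 : pvSndAt tokens (pos + 1 + 1 + 1) with
                | none => simp [pvConstrucoes, pvOuterA, pvMatchA, pvLoopB, h0, h1, hc2, h2, h3]
                | some t3 =>
                  by_cases hc19 : "SEPARADOR" = t3
                  · subst hc19
                    simp [pvConstrucoes, pvOuterA, pvMatchA, pvLoopB, h0, h1, hc2, h2, h3]
                    omega
                  · 
                    simp [pvConstrucoes, pvOuterA, pvMatchA, pvLoopB, h0, h1, hc2, h2, h3, hc19]
              · 
                simp [pvConstrucoes, pvOuterA, pvMatchA, pvLoopB, h0, h1, hc2, h2, hc18]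
          · 
            simp [pvConstrucoes, pvOuterA, pvMatchA, pvLoopB, h0, h1, hc2, hc17]
    · 
      by_cases hc20 : "IMPRIMIR" = t0
      · subst hc20
        cases h1 : pvSndAt tokens (pos + 1) with
        | none => simp [pvConstrucoes, pvOuterA, pvMatchA, pvLoopB, h0, hc1, h1]
        | some t1 =>
          by_cases hc21 : "ABRIR" = t1
          · subst hc21
            cases h2 : pvSndAt tokens (pos + 1 + 1) with
            | none => simp [pvConstrucoes, pvOuterA, pvMatchA, pvLoopB, h0, hc1, h1, h2]
            | some t2 =>
              by_cases hc22 : "VAR" = t2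
              · subst hc22
                cases h3 : pvSndAt tokens (pos + 1 + 1 + 1) with
                | none => simp [pvConstrucoes, pvOuterA, pvMatchA, pvLoopB, h0, hc1, h1, h2, h3]
                | some t3 =>
                  by_cases hc23 : "FECHAR" = t3
                  · subst hc23
                    cases h4 : pvSndAt tokens (pos + 1 + 1 + 1 + 1) with
                    | none => simp [pvConstrucoes, pvOuterA, pvMatchA, pvLoopB, h0, hc1, h1, h2, h3, h4]
                    | some t4 =>
                      by_cases hc24 : "SEPARADOR" = t4
                      · subst hc24
                        simp [pvConstrucoes, pvOuterA, pvMatchA, pvLoopB, h0, hc1, h1, h2, h3, h4]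
                        omega
                      · 
                        simp [pvConstrucoes, pvOuterA, pvMatchA, pvLoopB, h0, hc1, h1, h2, h3, h4, hc24]
                  · 
                    simp [pvConstrucoes, pvOuterA, pvMatchA, pvLoopB, h0, hc1, h1, h2, h3, hc23]
              · 
                simp [pvConstrucoes, pvOuterA, pvMatchA, pvLoopB, h0, hc1, h1, h2, hc22]
          · 
            simp [pvConstrucoes, pvOuterA, pvMatchA, pvLoopB, h0, hc1, h1, hc21]
      · 
        simp [pvConstrucoes, pvOuterA, pvMatchA, pvLoopB, h0, hc1, hc20]

-- ===== VERDICT (by name: the statement is the Claim_ definition above) =====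
theorem consumirTokens_spec : Claim_equal_consumirTokens := by
  intro tokens pos _ _
  exact ports_agree tokens pos
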